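-- pv_equiv track=rewrite | github.com/haoxiangzhao12138/PLUME | VLM2Vec/eval.py | get_embedding_idx
-- ===== SOURCE A (Python) =====
-- def get_embedding_idx(generated_ids_trimmed, EMBEDDING_TOKEN_ID):
--
--     embedding_idx = []
--     # Search from the last token forward
--     for i, out_ids in enumerate(generated_ids_trimmed):
--         embed_exist = False
--         for j in range(len(out_ids) - 1, -1, -1):
--             if out_ids[j] == EMBEDDING_TOKEN_ID:
--                 if j + 1 >= len(out_ids) - 1:
--                     embedding_idx.append(-1)
--                 else:
--                     embedding_idx.append(j + 1)
--                 embed_exist = True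
--                 break
--         if not embed_exist:
--             embedding_idx.append(-1)
--
--         # embedding_idx.append(-1)
--
--     return embedding_idx
-- ===== SOURCE B (Python) =====
-- def get_embedding_idx(generated_ids_trimmed, EMBEDDING_TOKEN_ID):
--     # Staged: per row, first build the list of ALL matching positions,
--     # then decide from its last element; rows assembled by comprehension.
--     def row_idx(out_ids):
--         positions = [j for j, v in enumerate(out_ids) if v == EMBEDDING_TOKEN_ID]
--         if not positions:
--             return -1
--         k = positions[-1]
--         return k + 1 if k + 1 < len(out_ids) - 1 else -1
--     return [row_idx(out_ids) for out_ids in generated_ids_trimmed]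
-- ===== Notes on version B (the rewrite author's own statement) =====
-- stated objective: alternative
-- what changed: Replaces A's per-row backward scan with early break by a staged pipeline: a comprehension collects all matching positions per row, the decision is made once from the last collected position, and rows are mapped by a comprehension instead of appending to an accumulator.
import Mathlib
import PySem

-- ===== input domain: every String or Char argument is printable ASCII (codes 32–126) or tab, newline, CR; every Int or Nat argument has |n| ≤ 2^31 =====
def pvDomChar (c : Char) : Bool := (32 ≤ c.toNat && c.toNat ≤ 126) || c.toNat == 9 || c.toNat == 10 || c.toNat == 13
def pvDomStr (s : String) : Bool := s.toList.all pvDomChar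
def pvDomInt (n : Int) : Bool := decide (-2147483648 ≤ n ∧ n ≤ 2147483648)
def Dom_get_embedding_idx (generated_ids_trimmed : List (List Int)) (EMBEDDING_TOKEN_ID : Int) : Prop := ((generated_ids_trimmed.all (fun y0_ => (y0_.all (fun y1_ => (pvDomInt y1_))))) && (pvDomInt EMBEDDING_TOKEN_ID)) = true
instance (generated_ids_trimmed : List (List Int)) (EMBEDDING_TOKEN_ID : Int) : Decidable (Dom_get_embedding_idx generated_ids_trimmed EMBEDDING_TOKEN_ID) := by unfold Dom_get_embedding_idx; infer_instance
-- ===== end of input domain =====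

-- B replaces A's backward scan-with-break by a staged pipeline (collect all matching
-- positions, then decide from the last one) mapped over the rows; objective: alternative.

-- ===== PORT A =====
-- Inner loop of A: 'for j in range(len(out_ids)-1, -1, -1)' with break; the Nat
-- argument is the number of indices still to visit, current index = n.
def pvAScan (out : List Int) (tid : Int) : Nat → Int
  | 0 => -1      -- loop finished without break: embed_exist is False, append -1
  | n + 1 =>
    if PySem.List.pyGetD out (n : Int) 0 = tid then
      (if (n : Int) + 1 ≥ (out.length : Int) - 1 then -1 else (n : Int) + 1)
    else pvAScan out tid n

def get_embedding_idx (generated_ids_trimmed : List (List Int)) (EMBEDDING_TOKEN_ID : Int) : List Int :=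
  generated_ids_trimmed.foldl
    (fun embedding_idx out_ids => embedding_idx ++ [pvAScan out_ids EMBEDDING_TOKEN_ID out_ids.length]) []

-- ===== PORT B =====
-- row_idx: positions = [j for j,v in enumerate(out_ids) if v == tid]; decide from positions[-1].
def pvBRow (out : List Int) (tid : Int) : Int :=
  let positions := ((PySem.List.enumerate out 0).filter (fun jv => jv.2 == tid)).map Prod.fst
  if positions = [] then -1
  else
    match PySem.List.pyGet? positions (-1) with   -- positions[-1]; nonempty here, never none
    | none => -1
    | some k => if k + 1 < (out.length : Int) - 1 then k + 1 else -1

def get_embedding_idx_alt (generated_ids_trimmed : List (List Int)) (EMBEDDING_TOKEN_ID : Int) : List Int :=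
  generated_ids_trimmed.map (fun out_ids => pvBRow out_ids EMBEDDING_TOKEN_ID)

-- ===== PRECONDITION & SPEC =====
def Spec_get_embedding_idx (generated_ids_trimmed : List (List Int)) (EMBEDDING_TOKEN_ID : Int) (out : List Int) : Prop := out = get_embedding_idx_alt generated_ids_trimmed EMBEDDING_TOKEN_ID
instance (generated_ids_trimmed : List (List Int)) (EMBEDDING_TOKEN_ID : Int) (out : List Int) : Decidable (Spec_get_embedding_idx generated_ids_trimmed EMBEDDING_TOKEN_ID out) := by unfold Spec_get_embedding_idx; infer_instance

-- ===== CLAIM (what is proved, stated in full; the proofs are below) =====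
def Claim_equal_get_embedding_idx : Prop := ∀ (generated_ids_trimmed : List (List Int)) (EMBEDDING_TOKEN_ID : Int), Dom_get_embedding_idx generated_ids_trimmed EMBEDDING_TOKEN_ID → Spec_get_embedding_idx generated_ids_trimmed EMBEDDING_TOKEN_ID (get_embedding_idx generated_ids_trimmed EMBEDDING_TOKEN_ID)

-- ===== LEMMAS AND PROOFS =====

-- matching positions among the first n indices
def pvPos (out : List Int) (tid : Int) (n : Nat) : List Int :=
  ((PySem.List.enumerate (out.take n) 0).filter (fun jv => jv.2 == tid)).map Prod.fst

-- the decision B makes from a position list, phrased with getLast?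
def pvDecide (out : List Int) (l : List Int) : Int :=
  match l.getLast? with
  | none => -1
  | some k => if k + 1 < (out.length : Int) - 1 then k + 1 else -1

theorem pvPos_succ (out : List Int) (tid : Int) (n : Nat) (h : n < out.length) :
    pvPos out tid (n + 1) =
      pvPos out tid n ++ (if out[n] = tid then [(n : Int)] else []) := by
  unfold pvPos
  have htake : out.take (n + 1) = out.take n ++ [out[n]] := by
    rw [List.take_add_one (l := out) (i := n), List.getElem?_eq_getElem h]
    rfl
  rw [htake, PySem.List.enumerate_append, List.filter_append, List.map_append]
  have hlen : (out.take n).length = n := List.length_take_of_le (Nat.le_of_lt h)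
  simp only [hlen, PySem.List.enumerate_cons, PySem.List.enumerate_nil]
  by_cases hc : out[n] = tid <;> simp [hc]

theorem pvScan_eq_decide (out : List Int) (tid : Int) :
    ∀ n, n ≤ out.length → pvAScan out tid n = pvDecide out (pvPos out tid n) := by
  intro n
  induction n with
  | zero => intro _; simp [pvAScan, pvPos, pvDecide]
  | succ n ih =>
    intro hn
    have hlt : n < out.length := Nat.lt_of_succ_le hn
    rw [pvAScan, pvPos_succ out tid n hlt]
    have hget : PySem.List.pyGetD out (n : Int) 0 = out[n] :=
      PySem.List.pyGetD_ofNat _ _ _ hlt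
    by_cases hc : out[n] = tid
    · rw [if_pos (by rw [hget]; exact hc), if_pos hc]
      simp only [pvDecide, List.getLast?_concat]
      by_cases hb : (n : Int) + 1 ≥ (out.length : Int) - 1
      · rw [if_pos hb]
        have hnb : ¬ ((n : Int) + 1 < (out.length : Int) - 1) := by omega
        simp [hnb]
      · rw [if_neg hb]
        have hnb : (n : Int) + 1 < (out.length : Int) - 1 := by omega
        simp [hnb]
    · simp only [hget, hc, if_false, List.append_nil]
      exact ih (Nat.le_of_lt hlt)

theorem pvRow_eq (out : List Int) (tid : Int) :
    pvAScan out tid out.length = pvBRow out tid := by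
  rw [pvScan_eq_decide out tid out.length (le_refl _)]
  unfold pvBRow pvDecide
  have htake : out.take out.length = out := List.take_length
  simp only [pvPos, htake]
  set l := ((PySem.List.enumerate out 0).filter (fun jv => jv.2 == tid)).map Prod.fst with hl
  by_cases he : l = []
  · simp [he]
  · rw [if_neg he, PySem.List.pyGet?_neg_one]

theorem foldl_append_singleton_map {α β : Type} (f : α → β) :
    ∀ (xs : List α) (acc : List β),
      xs.foldl (fun r x => r ++ [f x]) acc = acc ++ xs.map f := by
  intro xs
  induction xs with
  | nil => simp
  | cons x t ih => intro acc; simp [ih, List.append_assoc]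

-- ===== VERDICT (by name: the statement is the Claim_ definition above) =====
theorem get_embedding_idx_spec : Claim_equal_get_embedding_idx := by
  intro gens tid _
  unfold Spec_get_embedding_idx get_embedding_idx get_embedding_idx_alt
  rw [foldl_append_singleton_map]
  simp only [List.nil_append]
  exact List.map_congr_left (fun r _ => pvRow_eq r tid)
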